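-- pv_equiv track=rewrite | github.com/al-faiz/git-clone-http-visual-alpha--ruujsq-git.codesubmit.io-visual-alpha-1-visual-alpha-dominoes-bodnaw | dominoes.py | find_domino_chain
-- ===== SOURCE A (Python) =====
-- def find_domino_chain(dominoes):
--     def backtrack(chain):
--         if len(chain) == len(dominoes):
--             if chain[0][0] == chain[-1][1]:
--                 return chain
--             else:
--                 return None
--
--         for i in range(len(dominoes)):
--             if not used[i]:
--                 if len(chain) == 0 or chain[-1][1] == dominoes[i][0]:
--                     chain.append(dominoes[i])
--                     used[i] = True
--                     result = backtrack(chain)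
--                     if result:
--                         return result
--                     used[i] = False
--                     chain.pop()
--
--         return None
--
--     used = [False] * len(dominoes)
--     chain = []
--     return backtrack(chain)
-- ===== SOURCE B (Python) =====
-- def find_domino_chain(dominoes):
--     def extend(first, last, remaining):
--         """Chain using all of `remaining`, starting at `last` and closing at `first`."""
--         if not remaining:
--             return [] if first == last else None
--         for k in range(len(remaining)):
--             d = remaining[k]
--             if d[0] == last:
--                 rest = extend(first, d[1], remaining[:k] + remaining[k + 1:])
--                 if rest is not None:
--                     return [d] + rest
--         return None
--
--     for k in range(len(dominoes)):
--         d = dominoes[k]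
--         rest = extend(d[0], d[1], dominoes[:k] + dominoes[k + 1:])
--         if rest is not None:
--             return [d] + rest
--     return None
-- ===== Notes on version B (the rewrite author's own statement) =====
-- stated objective: alternative
-- what changed: Replaces the used-flag array plus shared mutable chain backtracker by a pure recursion on the list of remaining dominoes (threading the chain's first and last pip and consing on return), so each step scans only the dominoes still unused instead of the whole array with flags.
import Mathlib
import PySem

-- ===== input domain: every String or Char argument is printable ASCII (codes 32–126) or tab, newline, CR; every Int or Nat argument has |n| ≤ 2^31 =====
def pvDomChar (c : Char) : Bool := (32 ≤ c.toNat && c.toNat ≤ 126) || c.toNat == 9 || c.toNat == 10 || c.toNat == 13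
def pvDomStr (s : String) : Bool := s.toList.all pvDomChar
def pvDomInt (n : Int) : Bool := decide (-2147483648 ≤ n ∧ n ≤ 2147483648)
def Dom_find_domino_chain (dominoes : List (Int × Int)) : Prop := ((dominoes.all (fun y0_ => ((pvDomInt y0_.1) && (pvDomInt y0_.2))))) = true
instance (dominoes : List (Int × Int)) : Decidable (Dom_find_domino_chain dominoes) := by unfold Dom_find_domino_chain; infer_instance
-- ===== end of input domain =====

-- B replaces the used-flag backtracker by recursion on the list of remaining dominoes,
-- threading the chain's first and last pip instead of inspecting a mutated chain (alternative decomposition, same cost).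

-- ===== PORT A =====
-- A's `used` array is kept zipped with the dominoes; the index loop is the recursion over
-- that zipped list (pre = already-scanned prefix); `used[i] = True` + restore-on-failure is
-- modelled by passing the updated list down and the original list on to the next iteration.
-- Fuel bounds the recursion depth (chain grows each call), `length + 1` always suffices.
mutual
def btA : Nat → List ((Int × Int) × Bool) → List (Int × Int) → Option (List (Int × Int))
  | 0, _, _ => none
  | f+1, items, chain =>
    if chain.length = items.length then
      match chain.head?, chain.getLast? with
      | some a, some b => if a.1 = b.2 then some chain else none
      | _, _ => none
    else loopA f chain [] items
  termination_by f _ _ => (f, 0)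

def loopA : Nat → List (Int × Int) → List ((Int × Int) × Bool) → List ((Int × Int) × Bool) → Option (List (Int × Int))
  | _, _, _, [] => none
  | f, chain, pre, (d, u) :: rest =>
    if u = false ∧ (chain = [] ∨ chain.getLast?.map Prod.snd = some d.1) then
      match btA f (pre ++ (d, true) :: rest) (chain ++ [d]) with
      | some c => if c.isEmpty then loopA f chain (pre ++ [(d, u)]) rest else some c
      | none => loopA f chain (pre ++ [(d, u)]) rest
    else loopA f chain (pre ++ [(d, u)]) rest
  termination_by f _ _ suf => (f, suf.length + 1)
end

def find_domino_chain (dominoes : List (Int × Int)) : Option (List (Int × Int)) :=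
  btA (dominoes.length + 1) (dominoes.map (fun d => (d, false))) []

-- ===== PORT B =====
-- Source B's `extend(first, last, remaining)`; the `for k in range(len(remaining))` loop with the
-- slice `remaining[:k] + remaining[k+1:]` is the recursion over `remaining` carrying the
-- prefix `pre` (= remaining[:k]).  Fuel bounds the depth; `length + 1` suffices.
mutual
def extB : Nat → Int → Int → List (Int × Int) → Option (List (Int × Int))
  | 0, _, _, _ => none
  | f+1, first, last, rem =>
    match rem with
    | [] => if first = last then some [] else none
    | _ :: _ => loopB f first last [] rem
  termination_by f _ _ _ => (f, 0)

def loopB : Nat → Int → Int → List (Int × Int) → List (Int × Int) → Option (List (Int × Int))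
  | _, _, _, _, [] => none
  | f, first, last, pre, d :: rest =>
    if d.1 = last then
      match extB f first d.2 (pre ++ rest) with
      | some tail => some (d :: tail)
      | none => loopB f first last (pre ++ [d]) rest
    else loopB f first last (pre ++ [d]) rest
  termination_by f _ _ _ suf => (f, suf.length + 1)
end

def topB : List (Int × Int) → List (Int × Int) → Option (List (Int × Int))
  | _, [] => none
  | pre, d :: rest =>
    match extB ((pre ++ rest).length + 1) d.1 d.2 (pre ++ rest) with
    | some tail => some (d :: tail)
    | none => topB (pre ++ [d]) rest

def find_domino_chain_alt (dominoes : List (Int × Int)) : Option (List (Int × Int)) :=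
  topB [] dominoes

-- ===== PRECONDITION & SPEC =====
-- Pre_ excludes only the empty list, on which A raises IndexError (chain[0] on the empty chain).
def Pre_find_domino_chain (dominoes : List (Int × Int)) : Prop := dominoes ≠ []
instance (dominoes : List (Int × Int)) : Decidable (Pre_find_domino_chain dominoes) := by unfold Pre_find_domino_chain; infer_instance
def pvWitness_find_domino_chain : (List (Int × Int)) := [(1, 2), (2, 1)]

def Spec_find_domino_chain (dominoes : List (Int × Int)) (out : Option (List (Int × Int))) : Prop := out = find_domino_chain_alt dominoes
instance (dominoes : List (Int × Int)) (out : Option (List (Int × Int))) : Decidable (Spec_find_domino_chain dominoes out) := by unfold Spec_find_domino_chain; infer_instance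

-- ===== CLAIM (what is proved, stated in full; the proofs are below) =====
def Claim_equal_find_domino_chain : Prop := ∀ (dominoes : List (Int × Int)), Dom_find_domino_chain dominoes → Pre_find_domino_chain dominoes → Spec_find_domino_chain dominoes (find_domino_chain dominoes)

-- ===== LEMMAS AND PROOFS =====

-- the dominoes whose used-flag is still false, in index order (A's view of B's `remaining`)
def maskF : List ((Int × Int) × Bool) → List (Int × Int)
  | [] => []
  | (d, u) :: rest => if u then maskF rest else d :: maskF rest

lemma maskF_append (xs ys : List ((Int × Int) × Bool)) :
    maskF (xs ++ ys) = maskF xs ++ maskF ys := by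
  induction xs with
  | nil => rfl
  | cons p rest ih =>
    obtain ⟨d, u⟩ := p
    simp [maskF, ih]
    split <;> simp

lemma maskF_map_false (l : List (Int × Int)) :
    maskF (l.map (fun d => (d, false))) = l := by
  induction l with
  | nil => rfl
  | cons d rest ih => simp [maskF, ih]

lemma L2 (f : Nat)
    (IH : ∀ (items : List ((Int × Int) × Bool)) (chain : List (Int × Int)) (h d0 : Int × Int),
      chain.head? = some h → chain.getLast? = some d0 →
      chain.length + (maskF items).length = items.length →
      (maskF items).length + 1 ≤ f →
      btA f items chain = Option.map (chain ++ ·) (extB f h.1 d0.2 (maskF items))) :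
    ∀ (sufI preI : List ((Int × Int) × Bool)) (chain : List (Int × Int)) (h d0 : Int × Int),
    chain.head? = some h → chain.getLast? = some d0 →
    chain.length + (maskF (preI ++ sufI)).length = (preI ++ sufI).length →
    (maskF (preI ++ sufI)).length ≤ f →
    loopA f chain preI sufI = Option.map (chain ++ ·) (loopB f h.1 d0.2 (maskF preI) (maskF sufI)) := by
  intro sufI
  induction sufI with
  | nil => intro preI chain h d0 hh hl hlen hf; simp [loopA, maskF, loopB]
  | cons p rest ih =>
    obtain ⟨d, u⟩ := p
    intro preI chain h d0 hh hl hlen hf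
    have hcne : chain ≠ [] := by intro e; rw [e] at hh; simp at hh
    have hassoc : (preI ++ [(d, u)]) ++ rest = preI ++ (d, u) :: rest := by simp
    cases u with
    | true =>
      have hmt : maskF (preI ++ (d, true) :: rest) = maskF preI ++ maskF rest := by
        rw [maskF_append]; simp [maskF]
      have hmp : maskF (preI ++ [(d, true)]) = maskF preI := by
        rw [maskF_append]; simp [maskF]
      have hA : loopA f chain preI ((d, true) :: rest) = loopA f chain (preI ++ [(d, true)]) rest := by
        simp only [loopA]
        rw [if_neg]; simp
      rw [hA]
      have hcont := ih (preI ++ [(d, true)]) chain h d0 hh hl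
        (by rw [hassoc]; exact hlen) (by rw [hassoc]; exact hf)
      rw [hmp] at hcont
      rw [hcont]
      have hmc : maskF ((d, true) :: rest) = maskF rest := by simp [maskF]
      rw [hmc]
    | false =>
      have hmpre : maskF (preI ++ (d, false) :: rest) = maskF preI ++ d :: maskF rest := by
        rw [maskF_append]; simp [maskF]
      have hmp2 : maskF (preI ++ [(d, false)]) = maskF preI ++ [d] := by
        rw [maskF_append]; simp [maskF]
      have hmc : maskF ((d, false) :: rest) = d :: maskF rest := by simp [maskF]
      rw [hmpre] at hlen hf
      by_cases hmatch : d0.2 = d.1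
      · -- the candidate matches: both sides descend on it
        have hcond : (True ∧ (chain = [] ∨ Option.map Prod.snd chain.getLast? = some d.1)) :=
          ⟨trivial, Or.inr (by rw [hl]; simp [hmatch])⟩
        have hmt : maskF (preI ++ (d, true) :: rest) = maskF preI ++ maskF rest := by
          rw [maskF_append]; simp [maskF]
        have hbt := IH (preI ++ (d, true) :: rest) (chain ++ [d]) h d
          (by rw [List.head?_append, hh]; rfl)
          List.getLast?_concat
          (by rw [hmt]; simp at hlen ⊢; omega)
          (by rw [hmt]; simp at hf ⊢; omega)
        rw [hmt] at hbt
        simp only [loopA]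
        rw [if_pos hcond, hbt, hmc]
        simp only [loopB]
        rw [if_pos hmatch.symm]
        cases hE : extB f h.1 d.2 (maskF preI ++ maskF rest) with
        | some tail => simp
        | none =>
          simp only [Option.map_none]
          have hcont := ih (preI ++ [(d, false)]) chain h d0 hh hl
            (by rw [hassoc, hmpre]; exact hlen) (by rw [hassoc, hmpre]; exact hf)
          rw [hmp2] at hcont
          exact hcont
      · -- no match: both sides skip the candidate
        have hA : loopA f chain preI ((d, false) :: rest) = loopA f chain (preI ++ [(d, false)]) rest := by
          simp only [loopA]
          rw [if_neg]
          rintro ⟨-, h2⟩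
          rcases h2 with h2 | h2
          · exact hcne h2
          · rw [hl] at h2; simp at h2; exact hmatch h2
        rw [hA, hmc]
        simp only [loopB]
        rw [if_neg (fun h' => hmatch h'.symm)]
        have hcont := ih (preI ++ [(d, false)]) chain h d0 hh hl
          (by rw [hassoc, hmpre]; exact hlen) (by rw [hassoc, hmpre]; exact hf)
        rw [hmp2] at hcont
        exact hcont

lemma L1 : ∀ (f : Nat) (items : List ((Int × Int) × Bool)) (chain : List (Int × Int)) (h d0 : Int × Int),
    chain.head? = some h → chain.getLast? = some d0 →
    chain.length + (maskF items).length = items.length →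
    (maskF items).length + 1 ≤ f →
    btA f items chain = Option.map (chain ++ ·) (extB f h.1 d0.2 (maskF items)) := by
  intro f
  induction f with
  | zero => intro items chain h d0 _ _ _ hf; omega
  | succ f IH =>
    intro items chain h d0 hh hl hlen hf
    cases hr : maskF items with
    | nil =>
      rw [hr] at hlen
      simp at hlen
      simp only [btA, if_pos hlen, hh, hl, extB]
      by_cases he : h.1 = d0.2
      · rw [if_pos he, if_pos he]; simp
      · rw [if_neg he, if_neg he]; simp
    | cons x xs =>
      have hne : chain.length ≠ items.length := by rw [hr] at hlen; simp at hlen; omega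
      have hcont := L2 f IH items [] chain h d0 hh hl (by simpa using hlen)
        (by simp only [List.nil_append]; omega)
      simp only [maskF] at hcont
      rw [hr] at hcont
      simp only [btA]
      rw [if_neg hne]
      simp only [extB]
      exact hcont

lemma L3 : ∀ (suf pre : List (Int × Int)),
    loopA ((pre ++ suf).length) [] (pre.map (fun d => (d, false))) (suf.map (fun d => (d, false)))
      = topB pre suf := by
  intro suf
  induction suf with
  | nil => intro pre; simp [loopA, topB]
  | cons d rest ih =>
    intro pre
    have hm : maskF (pre.map (fun d => (d, false)) ++ (d, true) :: rest.map (fun d => (d, false)))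
        = pre ++ rest := by
      rw [maskF_append, maskF_map_false]; simp [maskF, maskF_map_false]
    have hbt := L1 ((pre ++ d :: rest).length)
      (pre.map (fun d => (d, false)) ++ (d, true) :: rest.map (fun d => (d, false))) [d] d d
      rfl rfl
      (by rw [hm]; simp [List.length_append]; omega)
      (by rw [hm]; simp [List.length_append])
    rw [hm] at hbt
    have hcond : (True ∧ (True ∨
        Option.map Prod.snd (([] : List (Int × Int))).getLast? = some d.1)) := ⟨trivial, Or.inl trivial⟩
    simp only [List.map_cons, loopA]
    rw [if_pos hcond]
    simp only [List.nil_append]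
    rw [hbt]
    have hfuel : (pre ++ rest).length + 1 = (pre ++ d :: rest).length := by
      simp only [List.length_append, List.length_cons]; omega
    simp only [topB]
    rw [hfuel]
    cases hE : extB ((pre ++ d :: rest).length) d.1 d.2 (pre ++ rest) with
    | some tail => simp
    | none =>
      simp only [Option.map_none]
      have hcont := ih (pre ++ [d])
      rw [show ((pre ++ [d]) ++ rest).length = (pre ++ d :: rest).length by
        simp only [List.length_append, List.length_cons, List.length_nil]; omega] at hcont
      simp only [List.map_append, List.map_cons, List.map_nil] at hcont
      exact hcont

-- ===== VERDICT (by name: the statement is the Claim_ definition above) =====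
theorem find_domino_chain_spec : Claim_equal_find_domino_chain := by
  intro ds _ hpre
  unfold Spec_find_domino_chain find_domino_chain find_domino_chain_alt
  have hne : ¬ ([] : List (Int × Int)).length = (ds.map (fun d => (d, false))).length := by
    simp only [List.length_nil, List.length_map]
    intro e; exact hpre (List.eq_nil_of_length_eq_zero e.symm)
  simp only [btA]
  rw [if_neg hne]
  have hcont := L3 ds []
  simpa using hcont
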